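-- pv_equiv track=rewrite | github.com/minsik-ai/ProblemSolving | CodeForces/R616/C.py | solve
-- ===== SOURCE A (Python) =====
-- def solve(n, m, k, a_s):
--     ans = 1
--     # if k >= m, rest of k is meaningless. Thus reset k here.
--     k = min(k, m - 1)
--
--     rand_thresh = m - 1 - k
--
--     for st_init in range(k + 1):
--         # Handle fixed case
--         ed_init = n - 1 - (k - st_init)
--         rands = max(rand_thresh, 0)
--
--         st = st_init
--         ed = ed_init
--         if rands > 0:
--             rand_ans = 10 ** 9
--             for st_offset in range(rands + 1):
--                 ed_offset = rands - st_offset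
--                 rand_ans = min(rand_ans, max(a_s[st + st_offset], a_s[ed - ed_offset]))
--             ans = max(ans, rand_ans)
--         else:
--             ans = max(ans, max(a_s[st], a_s[ed]))
--
--     return ans
-- ===== SOURCE B (Python) =====
-- def solve(n, m, k, a_s):
--     # Faster: pair positions once into b[l] = max(a_s[l], a_s[l + n - m]), then take
--     # the max over the k+1 sliding windows of width w of the window minimum, computed
--     # in O(len(b)) with per-block suffix minima plus a running prefix minimum.
--     INF = 10 ** 9
--     k = min(k, m - 1)
--     if k < 0:
--         return 1
--     w = max(m - 1 - k, 0) + 1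
--     L = k + w
--     d = n - m
--     b = [max(a_s[l], a_s[l + d]) for l in range(L)]
--     if w == 1:
--         return max(1, max(b))
--     # suffix minima within blocks of size w (built back-to-front, then reversed)
--     suf_rev = []
--     for j in range(L - 1, -1, -1):
--         s = INF if ((j + 1) % w == 0 or not suf_rev) else suf_rev[-1]
--         suf_rev.append(min(b[j], s))
--     suf = suf_rev[::-1]
--     ans = 1
--     p = INF
--     for j in range(L):
--         if j % w == 0:
--             p = INF
--         p = min(p, b[j])
--         if j >= w - 1:
--             ans = max(ans, min(suf[j - w + 1], p))
--     return ans
-- ===== Notes on version B (the rewrite author's own statement) =====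
-- stated objective: faster
-- what changed: A scans each of the k+1 windows separately (O(k*(m-k)) pairwise maxima); B pairs positions once into b[l]=max(a[l],a[l+n-m]) and computes all sliding-window minima in one O(m) pass using per-block suffix minima plus a running prefix minimum.
import Mathlib
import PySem

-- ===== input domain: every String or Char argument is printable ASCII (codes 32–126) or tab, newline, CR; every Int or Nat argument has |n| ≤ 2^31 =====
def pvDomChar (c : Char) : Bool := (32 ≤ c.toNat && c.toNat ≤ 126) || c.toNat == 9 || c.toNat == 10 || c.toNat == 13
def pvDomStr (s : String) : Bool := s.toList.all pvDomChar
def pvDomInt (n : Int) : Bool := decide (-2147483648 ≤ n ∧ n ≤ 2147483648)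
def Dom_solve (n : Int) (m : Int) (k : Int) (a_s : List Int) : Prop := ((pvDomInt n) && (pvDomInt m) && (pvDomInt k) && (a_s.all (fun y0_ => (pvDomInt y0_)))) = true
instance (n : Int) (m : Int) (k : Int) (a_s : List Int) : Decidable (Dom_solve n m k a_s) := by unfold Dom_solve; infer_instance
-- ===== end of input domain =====

-- B replaces A's O(k·(m-k)) nested window scan by an O(m) pass: pair positions once
-- into b[l] = max(a[l], a[l+n-m]) and compute all sliding-window minima with per-block
-- suffix minima plus a running prefix minimum (objective: faster, asymptotic).

-- ===== PORT A =====
def solve (n : Int) (m : Int) (k : Int) (a_s : List Int) : Int :=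
  let ans : Int := 1
  let k := min k (m - 1)
  let rand_thresh := m - 1 - k
  (PySem.List.pyRange 0 (k + 1) 1).foldl (fun ans st_init =>
    let ed_init := n - 1 - (k - st_init)
    let rands := max rand_thresh 0
    let st := st_init
    let ed := ed_init
    if rands > 0 then
      let rand_ans := (PySem.List.pyRange 0 (rands + 1) 1).foldl (fun rand_ans st_offset =>
        let ed_offset := rands - st_offset
        min rand_ans (max (PySem.List.pyGetD a_s (st + st_offset) 0)
                          (PySem.List.pyGetD a_s (ed - ed_offset) 0))) (10 ^ 9)
      max ans rand_ans
    else
      max ans (max (PySem.List.pyGetD a_s st 0) (PySem.List.pyGetD a_s ed 0))) ans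

-- ===== PORT B =====
-- one step of B's suffix-minima loop (Python's suf_rev list is built by append; here it
-- is consed, so the finished accumulator IS suf_rev[::-1], Python's final reverse)
def sufStep (w : Int) (b : List Int) (suf_rev : List Int) (j : Int) : List Int :=
  let s := if PySem.Int.mod (j + 1) w == 0 || suf_rev.isEmpty then (10:Int) ^ 9 else suf_rev.headD 0
  min (PySem.List.pyGetD b j 0) s :: suf_rev

-- one step of B's answer loop: state (ans, running in-block prefix minimum p)
def mainStep (w : Int) (b : List Int) (suf : List Int) (st : Int × Int) (j : Int) : Int × Int :=
  let p := if PySem.Int.mod j w == 0 then (10:Int) ^ 9 else st.2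
  let p := min p (PySem.List.pyGetD b j 0)
  if j ≥ w - 1 then (max st.1 (min (PySem.List.pyGetD suf (j - w + 1) 0) p), p) else (st.1, p)

def solve_alt (n : Int) (m : Int) (k : Int) (a_s : List Int) : Int :=
  let k := min k (m - 1)
  if k < 0 then 1 else
  let w := max (m - 1 - k) 0 + 1
  let L := k + w
  let d := n - m
  let b := (PySem.List.pyRange 0 L 1).map
    (fun l => max (PySem.List.pyGetD a_s l 0) (PySem.List.pyGetD a_s (l + d) 0))
  if w == 1 then
    max 1 ((PySem.List.max? b (fun v => v)).getD 0)
  else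
    let suf := (PySem.List.pyRange (L - 1) (-1) (-1)).foldl (sufStep w b) []
    ((PySem.List.pyRange 0 L 1).foldl (mainStep w b suf) (1, (10:Int) ^ 9)).1

-- ===== PRECONDITION & SPEC =====
-- Pre_solve holds exactly when Python A returns (no IndexError): either the loop is
-- empty, or every accessed index l and l+(n-m), 0 ≤ l < L, is a valid Python index.
def Pre_solve (n : Int) (m : Int) (k : Int) (a_s : List Int) : Prop :=
  min k (m - 1) < 0 ∨
    (min k (m - 1) + max (m - 1 - min k (m - 1)) 0 + 1 ≤ (a_s.length : Int) ∧
     -(a_s.length : Int) ≤ n - m ∧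
     min k (m - 1) + max (m - 1 - min k (m - 1)) 0 + 1 + (n - m) ≤ (a_s.length : Int))
instance (n : Int) (m : Int) (k : Int) (a_s : List Int) : Decidable (Pre_solve n m k a_s) := by
  unfold Pre_solve; infer_instance

def pvWitness_solve : Int × Int × Int × List Int := (5, 4, 1, [3, 1, 4, 1, 5])

def Spec_solve (n : Int) (m : Int) (k : Int) (a_s : List Int) (out : Int) : Prop := out = solve_alt n m k a_s
instance (n : Int) (m : Int) (k : Int) (a_s : List Int) (out : Int) : Decidable (Spec_solve n m k a_s out) := by unfold Spec_solve; infer_instance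

-- ===== CLAIM (what is proved, stated in full; the proofs are below) =====
def Claim_equal_solve : Prop := ∀ (n : Int) (m : Int) (k : Int) (a_s : List Int), Dom_solve n m k a_s → Pre_solve n m k a_s → Spec_solve n m k a_s (solve n m k a_s)

-- ===== LEMMAS AND PROOFS =====

-- the paired value both programs take window minima of
def pvG (n m : Int) (a_s : List Int) (l : Int) : Int :=
  max (PySem.List.pyGetD a_s l 0) (PySem.List.pyGetD a_s (l + (n - m)) 0)

-- min over g on [lo, hi), seeded with A's (and B's) sentinel 10^9
def pvWmin (g : Int → Int) (lo hi : Int) : Int :=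
  ((PySem.List.pyRange lo hi 1).map g).foldl min (10 ^ 9)

-- block end (exclusive) for index j, blocks of width w cut at multiples of w, capped at L
def pvBend (w L j : Int) : Int := min L (j + w - j % w)

-- suffix minimum from j to the end of j's block
def pvSuf (g : Int → Int) (w L j : Int) : Int := pvWmin g j (pvBend w L j)

-- answer after all windows ending before t are folded in
def pvAA (g : Int → Int) (w t : Int) : Int :=
  (PySem.List.pyRange 0 (t - w + 1) 1).foldl (fun a st => max a (pvWmin g st (st + w))) 1

-- running in-block prefix minimum after processing [0, t)
def pvPP (g : Int → Int) (w t : Int) : Int :=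
  if t = 0 then (10:Int) ^ 9 else pvWmin g (t - 1 - (t - 1) % w) t

theorem foldl_min_pull (l : List Int) (a c : Int) : l.foldl min (min c a) = min c (l.foldl min a) := by
  induction l generalizing a with
  | nil => rfl
  | cons x t ih => simp only [List.foldl_cons, min_assoc]; exact ih (min a x)

theorem foldl_min_le (l : List Int) (a : Int) : l.foldl min a ≤ a := by
  induction l generalizing a with
  | nil => simp
  | cons x t ih => exact le_trans (ih (min a x)) (min_le_left a x)

theorem pvWmin_le (g : Int → Int) (lo hi : Int) : pvWmin g lo hi ≤ 10 ^ 9 :=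
  foldl_min_le _ _

theorem pvWmin_single (g : Int → Int) (lo : Int) : pvWmin g lo (lo + 1) = min (10 ^ 9) (g lo) := by
  unfold pvWmin
  rw [PySem.List.pyRange_one_singleton]
  rfl

theorem pvWmin_succ_right (g : Int → Int) (lo hi : Int) (h : lo ≤ hi) :
    pvWmin g lo (hi + 1) = min (pvWmin g lo hi) (g hi) := by
  unfold pvWmin
  rw [PySem.List.pyRange_one_succ_right h, List.map_append, List.foldl_append]
  rfl

theorem pvWmin_split (g : Int → Int) (lo mid hi : Int) (h1 : lo ≤ mid) (h2 : mid ≤ hi) :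
    min (pvWmin g lo mid) (pvWmin g mid hi) = pvWmin g lo hi := by
  unfold pvWmin
  rw [PySem.List.pyRange_one_append lo mid hi h1 h2, List.map_append, List.foldl_append]
  generalize ((PySem.List.pyRange mid hi 1).map g) = l2
  generalize hA : ((PySem.List.pyRange lo mid 1).map g).foldl min (10 ^ 9) = A
  have hAle : A ≤ 10 ^ 9 := hA ▸ foldl_min_le _ _
  have : l2.foldl min A = l2.foldl min (min A (10 ^ 9)) := by rw [min_eq_left hAle]
  rw [this, foldl_min_pull]

theorem pvWmin_cons (g : Int → Int) (lo hi : Int) (h : lo < hi) :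
    min (g lo) (pvWmin g (lo + 1) hi) = pvWmin g lo hi := by
  rw [← pvWmin_split g lo (lo + 1) hi (by omega) (by omega), pvWmin_single]
  have h1 := pvWmin_le g (lo + 1) hi
  omega

theorem pyRange_shift (s c : Int) :
    PySem.List.pyRange s (s + c) 1 = (PySem.List.pyRange 0 c 1).map (fun t => s + t) := by
  rw [PySem.List.pyRange_one, PySem.List.pyRange_one, List.map_map]
  simp

theorem solveA_neg (n m k : Int) (a_s : List Int) (h : min k (m - 1) < 0) :
    solve n m k a_s = 1 := by
  simp only [solve]
  rw [PySem.List.pyRange_one_eq_nil (a := 0) (b := min k (m - 1) + 1) (by omega)]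
  rfl

theorem solveA_zero (n m k : Int) (a_s : List Int) (_h0 : 0 ≤ min k (m - 1))
    (hr : m - 1 - min k (m - 1) = 0) :
    solve n m k a_s = (PySem.List.pyRange 0 (min k (m - 1) + 1) 1).foldl
      (fun a st => max a (pvG n m a_s st)) 1 := by
  simp only [solve]
  apply List.foldl_ext
  intro a st hst
  rw [PySem.List.mem_pyRange_one] at hst
  have hmax : max (m - 1 - min k (m - 1)) 0 = 0 := by omega
  rw [hmax, if_neg (by omega)]
  have hidx : n - 1 - (min k (m - 1) - st) = st + (n - m) := by omega
  rw [hidx]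
  rfl

theorem solveA_pos (n m k : Int) (a_s : List Int) (_h0 : 0 ≤ min k (m - 1))
    (hr : 0 < m - 1 - min k (m - 1)) :
    solve n m k a_s = (PySem.List.pyRange 0 (min k (m - 1) + 1) 1).foldl
      (fun a st => max a (pvWmin (pvG n m a_s) st (st + (m - 1 - min k (m - 1) + 1)))) 1 := by
  simp only [solve]
  apply List.foldl_ext
  intro a st hst
  rw [PySem.List.mem_pyRange_one] at hst
  have hmax : max (m - 1 - min k (m - 1)) 0 = m - 1 - min k (m - 1) := by omega
  rw [hmax, if_pos (by omega)]
  congr 1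
  unfold pvWmin
  rw [pyRange_shift st (m - 1 - min k (m - 1) + 1)]
  simp only [List.foldl_map]
  apply List.foldl_ext
  intro acc off hoff
  rw [PySem.List.mem_pyRange_one] at hoff
  have h1 : n - 1 - (min k (m - 1) - st) - (m - 1 - min k (m - 1) - off) = st + off + (n - m) := by
    omega
  rw [h1]
  rfl

theorem emod_pred (w t : Int) (hw : 0 < w) :
    (t - 1) % w = if t % w = 0 then w - 1 else t % w - 1 := by
  have heq : w * (t / w) + t % w = t := Int.mul_ediv_add_emod t w
  have hr0 : 0 ≤ t % w := Int.emod_nonneg t (by omega)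
  have hrw : t % w < w := Int.emod_lt_of_pos t hw
  by_cases h : t % w = 0
  · rw [if_pos h]
    have h1 : t - 1 = w - 1 + w * (t / w - 1) := by
      rw [mul_sub, mul_one]; omega
    rw [h1, Int.add_mul_emod_self_left]
    exact Int.emod_eq_of_lt (by omega) (by omega)
  · rw [if_neg h]
    have h1 : t - 1 = (t % w - 1) + w * (t / w) := by omega
    rw [h1, Int.add_mul_emod_self_left]
    exact Int.emod_eq_of_lt (by omega) (by omega)

theorem sufStep_eq (g : Int → Int) (w L j : Int) (b : List Int)
    (hw : 2 ≤ w) (hj : 0 ≤ j) (hjL : j < L)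
    (hb : b = (PySem.List.pyRange 0 L 1).map g) :
    sufStep w b ((PySem.List.pyRange (j + 1) L 1).map (pvSuf g w L)) j
      = (PySem.List.pyRange j L 1).map (pvSuf g w L) := by
  rw [PySem.List.pyRange_one_cons (by omega : j < L), List.map_cons]
  unfold sufStep
  have hbj : PySem.List.pyGetD b j 0 = g j := by
    rw [hb]; exact PySem.List.pyGetD_map_pyRange_of_nonneg g L j 0 hj hjL
  have hmod : PySem.Int.mod (j + 1) w = (j + 1) % w :=
    PySem.Int.mod_eq_emod_of_pos (by omega)
  have hr0 : 0 ≤ j % w := Int.emod_nonneg j (by omega)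
  have hrw : j % w < w := Int.emod_lt_of_pos j (by omega)
  have hpred := emod_pred w (j + 1) (by omega)
  have hpred' : (j + 1) - 1 = j := by omega
  rw [hpred'] at hpred
  simp only [hbj, hmod]
  congr 1
  by_cases hz : (j + 1) % w = 0
  · -- end of a block: the suffix minimum restarts
    rw [if_pos (by simp [hz])]
    have hbend : pvBend w L j = j + 1 := by
      unfold pvBend
      rw [hpred, if_pos hz]
      omega
    unfold pvSuf
    rw [hbend, pvWmin_single, min_comm]
  · by_cases hE : L ≤ j + 1
    · -- last index: the accumulator is still empty
      have hnil : PySem.List.pyRange (j + 1) L 1 = [] := PySem.List.pyRange_one_eq_nil hE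
      rw [if_pos (by simp [hnil])]
      have hbend : pvBend w L j = j + 1 := by
        unfold pvBend
        rw [hpred, if_neg hz]
        have : 0 < (j + 1) % w := by
          rcases lt_or_eq_of_le (Int.emod_nonneg (j + 1) (by omega : w ≠ 0)) with h | h
          · exact h
          · exact absurd h.symm hz
        omega
      unfold pvSuf
      rw [hbend, pvWmin_single, min_comm]
    · -- middle of a block: extend the suffix minimum of j+1
      have hcons : PySem.List.pyRange (j + 1) L 1 = (j + 1) :: PySem.List.pyRange (j + 1 + 1) L 1 :=
        PySem.List.pyRange_one_cons (show j + 1 < L by omega)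
      rw [if_neg (by simp [hcons, hz])]
      rw [hcons, List.map_cons, List.headD_cons]
      have hz1 : 0 < (j + 1) % w := by
        rcases lt_or_eq_of_le (Int.emod_nonneg (j + 1) (by omega : w ≠ 0)) with h | h
        · exact h
        · exact absurd h.symm hz
      have hr1w : (j + 1) % w < w := Int.emod_lt_of_pos (j + 1) (by omega)
      have hbend : pvBend w L j = pvBend w L (j + 1) := by
        unfold pvBend
        rw [hpred, if_neg hz]
        congr 1
        omega
      unfold pvSuf
      rw [hbend]
      apply pvWmin_cons
      unfold pvBend
      omega

theorem suf_inv (g : Int → Int) (w L : Int) (b : List Int) (hw : 2 ≤ w)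
    (hb : b = (PySem.List.pyRange 0 L 1).map g) (t : Nat) (ht : (t : Int) ≤ L) :
    (PySem.List.pyRange (L - 1) (L - 1 - t) (-1)).foldl (sufStep w b) []
      = (PySem.List.pyRange (L - t) L 1).map (pvSuf g w L) := by
  induction t with
  | zero =>
    rw [PySem.List.pyRange_neg_one_eq_nil (by omega), PySem.List.pyRange_one_eq_nil (by omega)]
    rfl
  | succ t ih =>
    have ht' : (t : Int) ≤ L := by push_cast at ht ⊢; omega
    have hcast : ((t + 1 : Nat) : Int) = (t : Int) + 1 := by push_cast; ring
    rw [hcast]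
    have h1 : PySem.List.pyRange (L - 1) (L - 1 - ((t : Int) + 1)) (-1)
        = (PySem.List.pyRange (L - (t : Int) - 1) L 1).reverse := by
      rw [PySem.List.pyRange_neg_one_eq_reverse,
          show L - 1 - ((t : Int) + 1) + 1 = L - (t : Int) - 1 by omega,
          show L - 1 + 1 = L by omega]
    have h2 : PySem.List.pyRange (L - (t : Int) - 1) L 1
        = (L - (t : Int) - 1) :: PySem.List.pyRange (L - (t : Int) - 1 + 1) L 1 :=
      PySem.List.pyRange_one_cons (show L - (t : Int) - 1 < L by push_cast at ht; omega)
    rw [h1, h2, List.reverse_cons, List.foldl_append]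
    have h3 : (PySem.List.pyRange (L - (t : Int) - 1 + 1) L 1).reverse
        = PySem.List.pyRange (L - 1) (L - 1 - (t : Int)) (-1) := by
      rw [PySem.List.pyRange_neg_one_eq_reverse,
          show L - 1 - (t : Int) + 1 = L - (t : Int) - 1 + 1 by omega,
          show L - 1 + 1 = L by omega]
    rw [h3, ih ht']
    simp only [List.foldl_cons, List.foldl_nil]
    have hj0 : (0 : Int) ≤ L - (t : Int) - 1 := by push_cast at ht; omega
    have h5 := sufStep_eq g w L (L - (t : Int) - 1) b hw hj0 (by omega) hb
    rw [show L - (t : Int) - 1 + 1 = L - (t : Int) by omega] at h5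
    rw [h5, show L - ((t : Int) + 1) = L - (t : Int) - 1 by omega]

theorem suf_full (g : Int → Int) (w L : Int) (b : List Int) (hw : 2 ≤ w) (hL : 0 ≤ L)
    (hb : b = (PySem.List.pyRange 0 L 1).map g) :
    (PySem.List.pyRange (L - 1) (-1) (-1)).foldl (sufStep w b) []
      = (PySem.List.pyRange 0 L 1).map (pvSuf g w L) := by
  have h1 := suf_inv g w L b hw hb L.toNat (by omega)
  have h2 : L - 1 - (L.toNat : Int) = -1 := by omega
  have h3 : L - (L.toNat : Int) = 0 := by omega
  rw [h2, h3] at h1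
  exact h1

theorem pvPP_succ (g : Int → Int) (w j : Int) (hj : 0 ≤ j) :
    pvPP g w (j + 1) = pvWmin g (j - j % w) (j + 1) := by
  unfold pvPP
  rw [if_neg (by omega : ¬ j + 1 = 0)]
  rw [show j + 1 - 1 = j by omega]

theorem mainStep_eq (g : Int → Int) (w L j : Int) (b suf : List Int) (hw : 2 ≤ w)
    (hj : 0 ≤ j) (hjL : j < L)
    (hb : b = (PySem.List.pyRange 0 L 1).map g)
    (hsuf : suf = (PySem.List.pyRange 0 L 1).map (pvSuf g w L)) :
    mainStep w b suf (pvAA g w j, pvPP g w j) j = (pvAA g w (j + 1), pvPP g w (j + 1)) := by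
  have hbj : PySem.List.pyGetD b j 0 = g j := by
    rw [hb]; exact PySem.List.pyGetD_map_pyRange_of_nonneg g L j 0 hj hjL
  have hmod : PySem.Int.mod j w = j % w := PySem.Int.mod_eq_emod_of_pos (by omega)
  have hr0 : 0 ≤ j % w := Int.emod_nonneg j (by omega)
  have hrw : j % w < w := Int.emod_lt_of_pos j (by omega)
  -- the running prefix minimum updates to pvPP (j+1)
  have hpp : min (if j % w = 0 then (10 : Int) ^ 9 else pvPP g w j) (g j) = pvPP g w (j + 1) := by
    rw [pvPP_succ g w j hj]
    by_cases hz : j % w = 0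
    · rw [if_pos hz, hz, sub_zero, pvWmin_single]
    · rw [if_neg hz]
      have hjne : ¬ j = 0 := by
        intro h; apply hz; rw [h]; exact Int.zero_emod w
      have hpred := emod_pred w j (by omega)
      rw [if_neg hz] at hpred
      unfold pvPP
      rw [if_neg hjne, hpred, show j - 1 - (j % w - 1) = j - j % w by omega,
          pvWmin_succ_right g (j - j % w) j (by omega)]
  unfold mainStep
  simp only [hmod, hbj, beq_iff_eq]
  by_cases hge : j ≥ w - 1
  · rw [if_pos hge]
    have hst0 : (0 : Int) ≤ j - w + 1 := by omega
    have hstL : j - w + 1 < L := by omega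
    have hsufget : PySem.List.pyGetD suf (j - w + 1) 0 = pvSuf g w L (j - w + 1) := by
      rw [hsuf]; exact PySem.List.pyGetD_map_pyRange_of_nonneg _ L _ 0 hst0 hstL
    have hstmod : (j - w + 1) % w = (j + 1) % w := by
      rw [show j - w + 1 = (j + 1) + w * (-1) by ring, Int.add_mul_emod_self_left]
    have hr10 : 0 ≤ (j + 1) % w := Int.emod_nonneg (j + 1) (by omega)
    have hr1w : (j + 1) % w < w := Int.emod_lt_of_pos (j + 1) (by omega)
    have hpred1 := emod_pred w (j + 1) (by omega)
    rw [show j + 1 - 1 = j by omega] at hpred1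
    -- the completed window's minimum
    have hcore : min (pvSuf g w L (j - w + 1)) (pvPP g w (j + 1)) = pvWmin g (j - w + 1) (j + 1) := by
      rw [pvPP_succ g w j hj]
      unfold pvSuf pvBend
      by_cases hz1 : (j + 1) % w = 0
      · rw [if_pos hz1] at hpred1
        rw [hstmod, hz1, sub_zero, show j - j % w = j - w + 1 by omega,
            show min L (j - w + 1 + w) = j + 1 by omega, min_self]
      · rw [if_neg hz1] at hpred1
        have hz1' : 0 < (j + 1) % w := by
          rcases lt_or_eq_of_le hr10 with h | h
          · exact h
          · exact absurd h.symm hz1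
        rw [hstmod, show j - j % w = j - w + 1 + w - (j + 1) % w by omega,
            show min L (j - w + 1 + w - (j + 1) % w) = j - w + 1 + w - (j + 1) % w by omega]
        rw [pvWmin_split g (j - w + 1) (j - w + 1 + w - (j + 1) % w) (j + 1) (by omega) (by omega)]
    have haa : pvAA g w (j + 1) = max (pvAA g w j) (pvWmin g (j - w + 1) (j + 1)) := by
      unfold pvAA
      rw [show j + 1 - w + 1 = (j - w + 1) + 1 by omega,
          PySem.List.pyRange_one_succ_right (show (0:Int) ≤ j - w + 1 from hst0),
          List.foldl_append]
      simp only [List.foldl_cons, List.foldl_nil]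
      rw [show j - w + 1 + w = j + 1 by omega]
    rw [hsufget, hpp, hcore, haa]
  · rw [if_neg hge]
    have haa : pvAA g w (j + 1) = pvAA g w j := by
      unfold pvAA
      rw [PySem.List.pyRange_one_eq_nil (show j + 1 - w + 1 ≤ 0 by omega),
          PySem.List.pyRange_one_eq_nil (show j - w + 1 ≤ 0 by omega)]
    rw [hpp, haa]

theorem main_inv (g : Int → Int) (w L : Int) (b suf : List Int) (hw : 2 ≤ w)
    (hb : b = (PySem.List.pyRange 0 L 1).map g)
    (hsuf : suf = (PySem.List.pyRange 0 L 1).map (pvSuf g w L))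
    (t : Nat) (ht : (t : Int) ≤ L) :
    (PySem.List.pyRange 0 (t : Int) 1).foldl (mainStep w b suf) (1, (10 : Int) ^ 9)
      = (pvAA g w (t : Int), pvPP g w (t : Int)) := by
  induction t with
  | zero =>
    rw [show ((0 : Nat) : Int) = 0 by rfl, PySem.List.pyRange_one_eq_nil (by omega)]
    unfold pvAA pvPP
    rw [PySem.List.pyRange_one_eq_nil (by omega), if_pos rfl]
    rfl
  | succ t ih =>
    have ht' : (t : Int) ≤ L := by push_cast at ht ⊢; omega
    have hcast : ((t + 1 : Nat) : Int) = (t : Int) + 1 := by push_cast; ring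
    rw [hcast, PySem.List.pyRange_one_succ_right (show (0:Int) ≤ (t : Int) by omega),
        List.foldl_append, ih ht']
    simp only [List.foldl_cons, List.foldl_nil]
    exact mainStep_eq g w L (t : Int) b suf hw (by omega) (by push_cast at ht; omega) hb hsuf

theorem foldl_maxg_pull (g : Int → Int) (l : List Int) (a c : Int) :
    l.foldl (fun x y => max x (g y)) (max c a) = max c (l.foldl (fun x y => max x (g y)) a) := by
  induction l generalizing a with
  | nil => rfl
  | cons x t ih => simp only [List.foldl_cons, max_assoc]; exact ih (max a (g x))

theorem solveB_neg (n m k : Int) (a_s : List Int) (h : min k (m - 1) < 0) :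
    solve_alt n m k a_s = 1 := by
  simp only [solve_alt]
  rw [if_pos h]

theorem solveB_zero (n m k : Int) (a_s : List Int) (h0 : 0 ≤ min k (m - 1))
    (hr : m - 1 - min k (m - 1) = 0) :
    solve_alt n m k a_s = (PySem.List.pyRange 0 (min k (m - 1) + 1) 1).foldl
      (fun a st => max a (pvG n m a_s st)) 1 := by
  simp only [solve_alt]
  rw [if_neg (by omega)]
  have hmax : max (m - 1 - min k (m - 1)) 0 = 0 := by omega
  rw [hmax]
  simp only [zero_add]
  rw [if_pos (by decide : ((1 : Int) == 1) = true)]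
  have hgb : (fun l => max (PySem.List.pyGetD a_s l 0) (PySem.List.pyGetD a_s (l + (n - m)) 0))
      = pvG n m a_s := rfl
  rw [hgb]
  have hcons : PySem.List.pyRange 0 (min k (m - 1) + 1) 1
      = 0 :: PySem.List.pyRange (0 + 1) (min k (m - 1) + 1) 1 :=
    PySem.List.pyRange_one_cons (by omega)
  rw [hcons, List.map_cons, PySem.List.max?_id_cons, Option.getD_some]
  simp only [List.foldl_cons, List.foldl_map]
  rw [show max (1 : Int) (pvG n m a_s 0)
      = max (1 : Int) (max (pvG n m a_s 0) (pvG n m a_s 0)) by rw [max_self]]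
  rw [show (max (1 : Int) (max (pvG n m a_s 0) (pvG n m a_s 0)))
      = max 1 (max (pvG n m a_s 0) (pvG n m a_s 0)) from rfl]
  rw [max_self, ← foldl_maxg_pull (pvG n m a_s)]

theorem solveB_pos (n m k : Int) (a_s : List Int) (h0 : 0 ≤ min k (m - 1))
    (hr : 0 < m - 1 - min k (m - 1)) :
    solve_alt n m k a_s = (PySem.List.pyRange 0 (min k (m - 1) + 1) 1).foldl
      (fun a st => max a (pvWmin (pvG n m a_s) st (st + (m - 1 - min k (m - 1) + 1)))) 1 := by
  simp only [solve_alt]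
  rw [if_neg (by omega)]
  have hmax : max (m - 1 - min k (m - 1)) 0 = m - 1 - min k (m - 1) := by omega
  rw [hmax]
  rw [if_neg (by simp only [beq_iff_eq]; omega)]
  have hgb : (fun l => max (PySem.List.pyGetD a_s l 0) (PySem.List.pyGetD a_s (l + (n - m)) 0))
      = pvG n m a_s := rfl
  rw [hgb]
  have hw : 2 ≤ m - 1 - min k (m - 1) + 1 := by omega
  have hL0 : 0 ≤ min k (m - 1) + (m - 1 - min k (m - 1) + 1) := by omega
  rw [suf_full (pvG n m a_s) (m - 1 - min k (m - 1) + 1)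
        (min k (m - 1) + (m - 1 - min k (m - 1) + 1)) _ hw hL0 rfl]
  have hLt : min k (m - 1) + (m - 1 - min k (m - 1) + 1)
      = (((min k (m - 1) + (m - 1 - min k (m - 1) + 1)).toNat : Nat) : Int) := by omega
  rw [hLt]
  rw [main_inv (pvG n m a_s) (m - 1 - min k (m - 1) + 1) _ _ _ hw rfl (by rw [← hLt]) _ (by omega)]
  unfold pvAA
  rw [← hLt,
      show min k (m - 1) + (m - 1 - min k (m - 1) + 1) - (m - 1 - min k (m - 1) + 1) + 1
        = min k (m - 1) + 1 by ring]

-- ===== VERDICT (by name: the statement is the Claim_ definition above) =====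
theorem solve_spec : Claim_equal_solve := by
  intro n m k a_s _hdom _hpre
  unfold Spec_solve
  by_cases h0 : min k (m - 1) < 0
  · rw [solveA_neg n m k a_s h0, solveB_neg n m k a_s h0]
  · rw [not_lt] at h0
    by_cases hr : m - 1 - min k (m - 1) = 0
    · rw [solveA_zero n m k a_s h0 hr, solveB_zero n m k a_s h0 hr]
    · have hrpos : 0 < m - 1 - min k (m - 1) := by omega
      rw [solveA_pos n m k a_s h0 hrpos, solveB_pos n m k a_s h0 hrpos]
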